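-- pv_equiv track=rewrite | github.com/CharlotteMontanari/Licence-informatique | Licence2/I33/TP5.py | combinaison_lineaire
-- ===== SOURCE A (Python) =====
-- def combinaison_lineaire(c, V, p):
--     i = 0
--     liste = []
--     while i < len(V[0]):
--         j = 0
--         som = 0
--         while j < len(c):
--             V[j][i] = (V[j][i] * c[j]) % p
--             som =(som + V[j][i]) % p
--             j += 1
--         liste += [som]
--         i += 1
--     return liste
-- ===== SOURCE B (Python) =====
-- def combinaison_lineaire(c, V, p):
--     n = len(V[0])
--     for cj, row in zip(c, V):
--         row[:n] = [(x * cj) % p for x in row[:n]]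
--     return [sum(V[j][i] for j in range(len(c))) % p for i in range(n)]
-- ===== Notes on version B (the rewrite author's own statement) =====
-- stated objective: alternative
-- what changed: Replaces A's fused per-column read-scale-accumulate loop (which reduces mod p after every addition) by two separate passes: a row-scaling pass over zip(c, V) that rewrites each row in place, then a column-summing pass that reduces each column sum mod p once.
-- outside the precondition, e.g. on combinaison_lineaire([], [[1]], 0): A returns [0], B raises ZeroDivisionError
import Mathlib
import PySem

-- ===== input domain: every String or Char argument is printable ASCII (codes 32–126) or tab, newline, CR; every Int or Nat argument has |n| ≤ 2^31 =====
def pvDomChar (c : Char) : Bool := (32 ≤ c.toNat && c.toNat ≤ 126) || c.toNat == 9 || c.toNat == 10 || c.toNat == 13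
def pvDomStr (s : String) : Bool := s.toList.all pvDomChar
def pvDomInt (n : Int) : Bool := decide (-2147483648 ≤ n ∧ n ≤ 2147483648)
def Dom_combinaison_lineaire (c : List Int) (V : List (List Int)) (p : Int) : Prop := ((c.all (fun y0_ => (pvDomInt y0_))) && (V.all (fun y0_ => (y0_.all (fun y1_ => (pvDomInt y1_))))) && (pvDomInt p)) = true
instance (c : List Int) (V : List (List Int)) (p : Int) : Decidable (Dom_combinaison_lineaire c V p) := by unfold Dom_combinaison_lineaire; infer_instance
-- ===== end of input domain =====

-- B splits A's fused column loop into a row-scaling pass (mutating V in place, same cells and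
-- values as A inside Pre_) followed by a column-summing pass with a single final reduction mod p;
-- equivalence is about the RETURN value (inside Pre_ the final state of V is also identical,
-- though A mutates column by column and B row by row).

-- ===== PORT A =====
-- inner while loop: j runs over range(len(c)), threading the mutated matrix V and som
def pvAInner (c : List Int) (p : Int) (i : Nat) : List Nat → List (List Int) → Int → List (List Int) × Int
  | [], V, som => (V, som)
  | j :: js, V, som =>
      let v := PySem.Int.mod ((V.getD j []).getD i 0 * c.getD j 0) p
      pvAInner c p i js (V.set j ((V.getD j []).set i v)) (PySem.Int.mod (som + v) p)

-- outer while loop: i runs over range(len(V[0])) (row lengths are invariant under the writes)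
def pvAOuter (c : List Int) (p : Int) : List Nat → List (List Int) → List Int → List Int
  | [], _, liste => liste
  | i :: is, V, liste =>
      let r := pvAInner c p i (List.range c.length) V 0
      pvAOuter c p is r.1 (liste ++ [r.2])

def combinaison_lineaire (c : List Int) (V : List (List Int)) (p : Int) : List Int :=
  pvAOuter c p (List.range (V.headD []).length) V []

-- ===== PORT B =====
-- row[:n] = [(x*cj)%p for x in row[:n]]  (in-place row scaling)
def pvBRow (p cj : Int) (n : Nat) (row : List Int) : List Int :=
  ((row.take n).map (fun x => PySem.Int.mod (x * cj) p)) ++ row.drop n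

-- the matrix after the zip(c, V) scaling loop: rows paired with a coefficient are scaled,
-- the remaining rows are untouched
def pvBScale (c : List Int) (p : Int) (n : Nat) (V : List (List Int)) : List (List Int) :=
  (List.zipWith (fun cj row => pvBRow p cj n row) c V) ++ V.drop c.length

-- sum(V[j][i] for j in range(len(c)))
def pvBCol (W : List (List Int)) (m : Nat) (i : Nat) : Int :=
  (List.range m).foldl (fun s j => s + (W.getD j []).getD i 0) 0

def combinaison_lineaire_alt (c : List Int) (V : List (List Int)) (p : Int) : List Int :=
  (List.range (V.headD []).length).map
    (fun i => PySem.Int.mod (pvBCol (pvBScale c p (V.headD []).length V) c.length i) p)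

-- ===== PRECONDITION & SPEC =====
-- Pre_ excludes the inputs where the Python A raises (V empty → IndexError on V[0]; with a
-- nonempty first row: p = 0 → ZeroDivisionError, c longer than V or a row among the first
-- len(c) shorter than V[0] → IndexError), and additionally the corner c = [] ∧ p = 0 ∧
-- len(V[0]) > 0, where A returns a list of zeros without ever using p but B's final
-- reduction mod p raises ZeroDivisionError.
def Pre_combinaison_lineaire (c : List Int) (V : List (List Int)) (p : Int) : Prop :=
  V ≠ [] ∧ ((V.headD []).length = 0 ∨
    (p ≠ 0 ∧ c.length ≤ V.length ∧
      ∀ j, j < c.length → (V.headD []).length ≤ (V.getD j []).length))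
instance (c : List Int) (V : List (List Int)) (p : Int) : Decidable (Pre_combinaison_lineaire c V p) := by unfold Pre_combinaison_lineaire; infer_instance

def pvWitness_combinaison_lineaire : List Int × List (List Int) × Int := ([2, 3], [[1, 2], [3, 4]], 5)

def Spec_combinaison_lineaire (c : List Int) (V : List (List Int)) (p : Int) (out : List Int) : Prop := out = combinaison_lineaire_alt c V p
instance (c : List Int) (V : List (List Int)) (p : Int) (out : List Int) : Decidable (Spec_combinaison_lineaire c V p out) := by unfold Spec_combinaison_lineaire; infer_instance

-- ===== CLAIM (what is proved, stated in full; the proofs are below) =====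
def Claim_equal_combinaison_lineaire : Prop := ∀ (c : List Int) (V : List (List Int)) (p : Int), Dom_combinaison_lineaire c V p → Pre_combinaison_lineaire c V p → Spec_combinaison_lineaire c V p (combinaison_lineaire c V p)

-- ===== LEMMAS AND PROOFS =====

-- the value A stores into cell (j, i), read from the matrix V
def pvW (c : List Int) (p : Int) (V : List (List Int)) (j i : Nat) : Int :=
  PySem.Int.mod ((V.getD j []).getD i 0 * c.getD j 0) p

theorem pvGetD_set_self {α : Type} (V : List α) (j : Nat) (r d : α) (h : j < V.length) :
    (V.set j r).getD j d = r := by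
  simp [List.getD_eq_getElem?_getD, h]

theorem pvGetD_set_ne {α : Type} (V : List α) (j j' : Nat) (r d : α) (h : j ≠ j') :
    (V.set j r).getD j' d = V.getD j' d := by
  simp [List.getD_eq_getElem?_getD, List.getElem?_set_ne h]

-- cells in a column other than i are untouched by the inner loop
theorem pvAInner_fst (c : List Int) (p : Int) (i : Nat) (js : List Nat) :
    ∀ (V : List (List Int)) (som : Int) (j' i' : Nat), i' ≠ i →
      ((pvAInner c p i js V som).1.getD j' []).getD i' 0 = (V.getD j' []).getD i' 0 := by
  induction js with
  | nil => intro V som j' i' _; rfl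
  | cons j js ih =>
    intro V som j' i' hne
    rw [pvAInner, ih _ _ j' i' hne]
    by_cases hjj : j = j'
    · subst hjj
      by_cases hlen : j < V.length
      · rw [pvGetD_set_self _ _ _ _ hlen, pvGetD_set_ne _ i i' _ _ (fun h => hne h.symm)]
      · rw [List.set_eq_of_length_le (by omega)]
    · rw [pvGetD_set_ne _ _ _ _ _ hjj]

-- the inner loop's som is a fold of the stored values read from the INITIAL matrix
theorem pvAInner_snd (c : List Int) (p : Int) (i : Nat) (js : List Nat) :
    ∀ (V : List (List Int)) (som : Int), js.Nodup →
      (pvAInner c p i js V som).2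
        = js.foldl (fun s j => PySem.Int.mod (s + pvW c p V j i) p) som := by
  induction js with
  | nil => intro V som _; rfl
  | cons j js ih =>
    intro V som hnd
    rw [List.nodup_cons] at hnd
    rw [pvAInner, ih _ _ hnd.2, List.foldl_cons]
    have hW : pvW c p V j i = PySem.Int.mod ((V.getD j []).getD i 0 * c.getD j 0) p := rfl
    rw [← hW]
    apply PySem.List.foldl_congr_mem
    intro acc x hx
    have hne : j ≠ x := fun h => hnd.1 (h ▸ hx)
    unfold pvW
    rw [pvGetD_set_ne _ _ _ _ _ hne]

-- the pure per-column value of A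
def pvColA (c : List Int) (p : Int) (V : List (List Int)) (i : Nat) : Int :=
  (List.range c.length).foldl (fun s j => PySem.Int.mod (s + pvW c p V j i) p) 0

-- the outer loop appends pure column values, as long as the pending columns still
-- hold their original entries
theorem pvAOuter_spec (c : List Int) (p : Int) (V₀ : List (List Int)) :
    ∀ (is : List Nat) (V : List (List Int)) (liste : List Int), is.Nodup →
      (∀ j i', i' ∈ is → (V.getD j []).getD i' 0 = (V₀.getD j []).getD i' 0) →
      pvAOuter c p is V liste = liste ++ is.map (pvColA c p V₀) := by
  intro is
  induction is with
  | nil => intro V liste _ _; simp [pvAOuter]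
  | cons i is ih =>
    intro V liste hnd hagree
    rw [List.nodup_cons] at hnd
    rw [pvAOuter]
    have hsom : (pvAInner c p i (List.range c.length) V 0).2 = pvColA c p V₀ i := by
      rw [pvAInner_snd c p i _ V 0 List.nodup_range]
      unfold pvColA
      apply PySem.List.foldl_congr_mem
      intro acc j _
      unfold pvW
      rw [hagree j i (by simp)]
    rw [hsom, ih _ _ hnd.2 ?_]
    · simp
    · intro j i' hi'
      have hne : i' ≠ i := fun h => hnd.1 (h ▸ hi')
      rw [pvAInner_fst c p i _ V 0 j i' hne, hagree j i' (by simp [hi'])]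

-- folding with a reduction mod p at every step equals one reduction of the plain sum
theorem pvModAddMod (p s x : Int) :
    PySem.Int.mod (PySem.Int.mod s p + x) p = PySem.Int.mod (s + x) p := by
  simp [PySem.Int.mod]

theorem pvModFold (p : Int) (js : List Nat) (g : Nat → Int) :
    ∀ s : Int, js.foldl (fun s j => PySem.Int.mod (s + g j) p) (PySem.Int.mod s p)
      = PySem.Int.mod (js.foldl (fun s j => s + g j) s) p := by
  induction js with
  | nil => intro s; rfl
  | cons j js ih =>
    intro s
    rw [List.foldl_cons, List.foldl_cons, pvModAddMod, ih]

theorem pvModFoldZero (p : Int) (js : List Nat) (g : Nat → Int) :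
    js.foldl (fun s j => PySem.Int.mod (s + g j) p) 0
      = PySem.Int.mod (js.foldl (fun s j => s + g j) 0) p := by
  have h := pvModFold p js g 0
  rwa [show PySem.Int.mod 0 p = 0 by simp [PySem.Int.mod]] at h

-- inside Pre_ (nonempty first row), a scaled cell of B equals the value A stores there
theorem pvBScale_cell (c : List Int) (p : Int) (V : List (List Int)) (n j i : Nat)
    (hj : j < c.length) (hjV : j < V.length) (hin : i < n)
    (hrow : n ≤ (V.getD j []).length) :
    ((pvBScale c p n V).getD j []).getD i 0 = pvW c p V j i := by
  have hzl : j < (List.zipWith (fun cj row => pvBRow p cj n row) c V).length := by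
    rw [List.length_zipWith]; omega
  have h1 : (pvBScale c p n V).getD j [] = pvBRow p (c.getD j 0) n (V.getD j []) := by
    unfold pvBScale
    rw [List.getD_eq_getElem?_getD, List.getElem?_append_left hzl,
      List.getElem?_eq_getElem hzl, List.getElem_zipWith]
    simp [List.getD_eq_getElem?_getD, List.getElem?_eq_getElem hj, List.getElem?_eq_getElem hjV]
  rw [h1]
  unfold pvBRow pvW
  have hit : i < (((V.getD j []).take n).map (fun x => PySem.Int.mod (x * c.getD j 0) p)).length := by
    rw [List.length_map, List.length_take]; omega
  rw [List.getD_eq_getElem?_getD, List.getElem?_append_left hit]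
  have hil : i < (V.getD j []).length := by omega
  rw [List.getElem?_map, List.getElem?_take_of_lt hin, List.getElem?_eq_getElem hil]
  rw [List.getD_eq_getElem?_getD] at hil
  simp [List.getD_eq_getElem?_getD, List.getElem?_eq_getElem hil]

-- ===== VERDICT (by name: the statement is the Claim_ definition above) =====
theorem combinaison_lineaire_spec : Claim_equal_combinaison_lineaire := by
  intro c V p _ hpre
  unfold Spec_combinaison_lineaire
  obtain ⟨hV, hrest⟩ := hpre
  unfold combinaison_lineaire combinaison_lineaire_alt
  rw [pvAOuter_spec c p V _ V [] List.nodup_range (fun _ _ _ => rfl)]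
  rw [List.nil_append]
  apply List.map_congr_left
  intro i hi
  rw [List.mem_range] at hi
  rcases hrest with h0 | ⟨_, hcV, hrows⟩
  · omega
  · unfold pvColA pvBCol
    rw [pvModFoldZero p _ (fun j => pvW c p V j i)]
    congr 1
    apply PySem.List.foldl_congr_mem
    intro acc j hj
    rw [List.mem_range] at hj
    rw [pvBScale_cell c p V _ j i hj (by omega) hi (hrows j hj)]
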